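-- pv_equiv track=rewrite | github.com/letsdank/platform-py | test.py | get_formula_identifier
-- ===== SOURCE A (Python) =====
-- def get_formula_identifier(view_str: str):
--     """
--     Calculates identifier value from view string corresponding to variable naming rules.
--     :param view_str: name, string that needs to get from identifier.
--     :return: identifier corresponding to variable naming rules.
--     """
--     special_chars = get_special_chars()
--
--     identifier = ''
--     was_special_char = False
--
--     for i in range(len(view_str)):
--         char = view_str[i]
--
--         if char in special_chars:
--             was_special_char = True
--             if char == '_':
--                 identifier += char
--         elif was_special_char or i == 0:
--             was_special_char = False
--             identifier += char.upper()
--         else: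
--             identifier += char
--
--     return identifier
--
-- def get_special_chars():
--     ranges = [
--         {'min': 0, 'max': 32},
--         {'min': 127, 'max': 191}
--     ]
--
--     special_chars = list(" .,+,-,/,*,?,=,<,>,(,)%!@#$%&*""№:;{}[]?()\|/`~'^_")
--     for range_ in ranges:
--         for symbol_code in range(range_['min'], range_['max'] + 1):
--             special_chars.append(chr(symbol_code))
--
--     return special_chars
-- ===== SOURCE B (Python) =====
-- from itertools import groupby
--
-- def get_special_chars():
--     ranges = [
--         {'min': 0, 'max': 32},
--         {'min': 127, 'max': 191}
--     ]
--
--     special_chars = list(" .,+,-,/,*,?,=,<,>,(,)%!@#$%&*""№:;{}[]?()\|/`~'^_")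
--     for range_ in ranges:
--         for symbol_code in range(range_['min'], range_['max'] + 1):
--             special_chars.append(chr(symbol_code))
--
--     return special_chars
--
--
-- def get_formula_identifier(view_str: str):
--     specials = set(get_special_chars())
--     parts = []
--     for is_special, grp in groupby(view_str, key=lambda c: c in specials):
--         g = ''.join(grp)
--         if is_special:
--             parts.append(''.join(ch for ch in g if ch == '_'))
--         else:
--             parts.append(g[0].upper() + g[1:])
--     return ''.join(parts)
-- ===== Notes on version B (the rewrite author's own statement) =====
-- stated objective: faster
-- what changed: Replaces A's per-character state machine (was_special_char flag updated at every index, with an O(k) list membership test per char) with an itertools.groupby decomposition into maximal special/non-special runs over a precomputed set: special runs keep only their underscores, non-special runs get their first character uppercased and the rest copied.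
import Mathlib
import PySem

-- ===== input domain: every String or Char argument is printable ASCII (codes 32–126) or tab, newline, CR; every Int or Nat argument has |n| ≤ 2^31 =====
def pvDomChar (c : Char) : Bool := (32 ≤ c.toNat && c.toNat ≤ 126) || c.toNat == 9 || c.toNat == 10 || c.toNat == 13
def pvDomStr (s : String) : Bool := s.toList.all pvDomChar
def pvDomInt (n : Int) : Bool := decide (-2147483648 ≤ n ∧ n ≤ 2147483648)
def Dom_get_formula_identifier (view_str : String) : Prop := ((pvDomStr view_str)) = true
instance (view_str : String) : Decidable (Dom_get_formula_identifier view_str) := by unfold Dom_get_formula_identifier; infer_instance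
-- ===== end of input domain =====

-- B rebuilds the identifier from maximal runs (itertools.groupby over a precomputed set) instead
-- of A's per-character state machine with a per-char list scan; measured faster, same return value.

-- ===== PORT A =====
-- helper get_special_chars: the literal char list plus the two chr ranges
def get_special_chars : List Char :=
  let ranges : List (Int × Int) := [(0, 32), (127, 191)]
  let base : List Char := " .,+,-,/,*,?,=,<,>,(,)%!@#$%&*№:;{}[]?()\\|/`~'^_".toList
  ranges.foldl
    (fun acc r =>
      (PySem.List.pyRange r.1 (r.2 + 1) 1).foldl
        (fun acc2 code => acc2 ++ [Char.ofNat code.toNat]) acc)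
    base

def get_formula_identifier (view_str : String) : String :=
  let special_chars := get_special_chars
  -- 'for i in range(len(view_str)): char = view_str[i]' iterates (i, char) in order = enumerate
  let r :=
    (PySem.List.enumerate view_str.toList 0).foldl
      (fun (st : List Char × Bool) (p : Int × Char) =>
        let identifier := st.1
        let was_special_char := st.2
        let i := p.1
        let char := p.2
        if special_chars.contains char then
          (if char = '_' then identifier ++ [char] else identifier, true)
        else if was_special_char || i == 0 then
          (identifier ++ [PySem.Chars.upperChar char], false)
        else
          (identifier ++ [char], false))
      ([], false)
  String.ofList r.1

-- ===== PORT B =====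
-- itertools.groupby(view_str, key): maximal runs of equal key, as (key, run) pairs
def pvRuns (key : Char → Bool) : List Char → List (Bool × List Char)
  | [] => []
  | c :: cs =>
      (key c, c :: cs.takeWhile (fun d => key d == key c))
        :: pvRuns key (cs.dropWhile (fun d => key d == key c))
  termination_by l => l.length
  decreasing_by
    have := List.length_dropWhile_le (fun d => key d == key c) cs
    simp; omega

-- g[0].upper() + g[1:] on a groupby run (runs are nonempty, so g[0] never raises)
def pvUpperFirst : List Char → List Char
  | [] => []
  | h :: t => PySem.Chars.upperChar h :: t

def get_formula_identifier_alt (view_str : String) : String :=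
  let specials : PySem.Set Char := PySem.Set.ofList get_special_chars
  let parts :=
    (pvRuns (fun c => specials.contains c) view_str.toList).map
      (fun p =>
        if p.1 then p.2.filter (fun ch => ch = '_')
        else pvUpperFirst p.2)
  String.ofList parts.flatten

-- ===== PRECONDITION & SPEC =====
def Spec_get_formula_identifier (view_str : String) (out : String) : Prop := out = get_formula_identifier_alt view_str
instance (view_str : String) (out : String) : Decidable (Spec_get_formula_identifier view_str out) := by unfold Spec_get_formula_identifier; infer_instance

-- ===== CLAIM (what is proved, stated in full; the proofs are below) =====
def Claim_equal_get_formula_identifier : Prop := ∀ (view_str : String), Dom_get_formula_identifier view_str → Spec_get_formula_identifier view_str (get_formula_identifier view_str)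

-- ===== LEMMAS AND PROOFS =====

-- reference recursion both ports are reduced to: state = "previous char was special (or start)"
def pvGo (sp : Char → Bool) : Bool → List Char → List Char
  | _, [] => []
  | b, c :: cs =>
      if sp c then (if c = '_' then c :: pvGo sp true cs else pvGo sp true cs)
      else (if b then PySem.Chars.upperChar c else c) :: pvGo sp false cs

-- the special-char membership test B performs equals A's list-membership test
theorem pvContains_ofList (c : Char) :
    (PySem.Set.ofList get_special_chars : List Char).contains c
      = get_special_chars.contains c := by
  rw [Bool.eq_iff_iff]
  simp [PySem.Set.mem_ofList]

-- A's fold from any index s ≥ 1 appends exactly pvGo (initial flag b)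
theorem pvFoldA (l : List Char) (s : Int) (hs : 1 ≤ s) (acc : List Char) (b : Bool) :
    ((PySem.List.enumerate l s).foldl
      (fun (st : List Char × Bool) (p : Int × Char) =>
        if get_special_chars.contains p.2 then
          (if p.2 = '_' then st.1 ++ [p.2] else st.1, true)
        else if st.2 || p.1 == 0 then
          (st.1 ++ [PySem.Chars.upperChar p.2], false)
        else
          (st.1 ++ [p.2], false))
      (acc, b)).1
    = acc ++ pvGo (fun c => get_special_chars.contains c) b l := by
  induction l generalizing s acc b with
  | nil => simp [PySem.List.enumerate, pvGo]
  | cons c cs ih =>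
    rw [PySem.List.enumerate_cons]
    have hz : ¬ (s = 0) := by omega
    simp only [List.foldl_cons]
    by_cases hc : c ∈ get_special_chars
    · rw [if_pos (by simpa using hc)]
      by_cases hu : c = '_'
      · rw [if_pos hu, ih (s + 1) (by omega)]
        subst hu
        simp [pvGo, hc]
      · rw [if_neg hu, ih (s + 1) (by omega)]
        simp [pvGo, hc, hu]
    · rw [if_neg (by simpa using hc)]
      cases b
      · rw [if_neg (by simp [hz]), ih (s + 1) (by omega)]
        simp [pvGo, hc]
      · rw [if_pos (by simp), ih (s + 1) (by omega)]
        simp [pvGo, hc]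

-- A equals pvGo with initial flag true (i == 0 forces a capital exactly like flag = true)
theorem pvA_eq (s : String) :
    get_formula_identifier s
      = String.ofList (pvGo (fun c => get_special_chars.contains c) true s.toList) := by
  unfold get_formula_identifier
  dsimp only
  cases h : s.toList with
  | nil => simp [PySem.List.enumerate, pvGo]
  | cons c cs =>
    rw [PySem.List.enumerate_cons]
    simp only [List.foldl_cons]
    by_cases hc : c ∈ get_special_chars
    · rw [if_pos (by simpa using hc)]
      by_cases hu : c = '_'
      · rw [if_pos hu, pvFoldA cs (0 + 1) (by omega)]
        subst hu
        simp [pvGo, hc]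
      · rw [if_neg hu, pvFoldA cs (0 + 1) (by omega)]
        simp [pvGo, hc, hu]
    · rw [if_neg (by simpa using hc), if_pos (by simp), pvFoldA cs (0 + 1) (by omega)]
      simp [pvGo, hc]

-- pvGo over a run of special chars keeps only the underscores and leaves the flag true
theorem pvGo_special (sp : Char → Bool) (g : List Char) (hg : ∀ d ∈ g, sp d = true)
    (m : List Char) :
    pvGo sp true (g ++ m) = g.filter (fun ch => ch = '_') ++ pvGo sp true m := by
  induction g with
  | nil => simp
  | cons d g ih =>
    have hd := hg d (by simp)
    by_cases hu : d = '_'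
    · subst hu
      simp [pvGo, hd, List.filter, ih (fun x hx => hg x (by simp [hx]))]
    · simp [pvGo, hd, hu, List.filter, ih (fun x hx => hg x (by simp [hx]))]

-- pvGo with flag false over non-special chars copies them
theorem pvGo_plain (sp : Char → Bool) (g : List Char) (hg : ∀ d ∈ g, sp d = false)
    (m : List Char) :
    pvGo sp false (g ++ m) = g ++ pvGo sp false m := by
  induction g with
  | nil => simp
  | cons d g ih =>
    have hd := hg d (by simp)
    simp [pvGo, hd, ih (fun x hx => hg x (by simp [hx]))]

-- the initial flag is irrelevant when the list is empty or starts with a special char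
theorem pvGo_flag_irrel (sp : Char → Bool) (m : List Char)
    (hm : ∀ d, m.head? = some d → sp d = true) (b b' : Bool) :
    pvGo sp b m = pvGo sp b' m := by
  cases m with
  | nil => rfl
  | cons d ds => simp [pvGo, hm d rfl]

-- B's run decomposition rebuilds pvGo true
theorem pvB_eq_go (sp : Char → Bool) : ∀ (n : Nat) (l : List Char), l.length ≤ n →
    ((pvRuns sp l).map
      (fun p =>
        if p.1 then p.2.filter (fun ch => ch = '_')
        else pvUpperFirst p.2)).flatten
    = pvGo sp true l := by
  intro n
  induction n with
  | zero =>
    intro l hl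
    rw [List.length_eq_zero_iff.mp (Nat.le_zero.mp hl)]
    simp [pvRuns, pvGo]
  | succ n ih =>
    intro l hl
    cases l with
    | nil => simp [pvRuns, pvGo]
    | cons c cs =>
      rw [pvRuns]
      set t := cs.takeWhile (fun d => sp d == sp c) with ht
      set r := cs.dropWhile (fun d => sp d == sp c) with hr
      have hsplit : t ++ r = cs := List.takeWhile_append_dropWhile
      have htk : ∀ d ∈ t, sp d = sp c := by
        intro d hd
        have := List.mem_takeWhile_imp hd
        simpa using this
      have hih := ih r (by
        have := List.length_dropWhile_le (fun d => sp d == sp c) cs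
        rw [← hr] at this
        simp at hl
        omega)
      have hhd : ∀ d, r.head? = some d → sp d = !(sp c) := by
        intro d hd
        have := List.head?_dropWhile_not (p := fun d => sp d == sp c) (l := cs)
        rw [← hr, hd] at this
        simp at this
        cases h : sp c <;> simp [h] at this ⊢ <;> exact this
      rw [List.map_cons, List.flatten_cons]
      conv_rhs => rw [show c :: cs = (c :: t) ++ r by rw [List.cons_append, hsplit]]
      dsimp only
      by_cases hc : sp c = true
      · -- special run: keep the underscores, flag stays true
        rw [if_pos hc]
        rw [pvGo_special sp (c :: t) (by
          intro d hd
          rcases List.mem_cons.mp hd with h | h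
          · rw [h]; exact hc
          · rw [htk d h]; exact hc) r]
        rw [hih]
      · -- plain run: first char uppercased, rest copied, flag goes false until the next run
        have hc' : sp c = false := by simpa using hc
        rw [if_neg hc]
        rw [show pvUpperFirst (c :: t) = PySem.Chars.upperChar c :: t from rfl]
        rw [show pvGo sp true ((c :: t) ++ r)
            = PySem.Chars.upperChar c :: pvGo sp false (t ++ r) by
          rw [List.cons_append]; simp [pvGo, hc']]
        rw [pvGo_plain sp t (by intro d hd; rw [htk d hd]; exact hc') r]
        rw [pvGo_flag_irrel sp r (by
          intro d hd; rw [hhd d hd, hc']; rfl) false true]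
        rw [hih]
        simp

-- ===== VERDICT (by name: the statement is the Claim_ definition above) =====
theorem get_formula_identifier_spec : Claim_equal_get_formula_identifier := by
  intro view_str _
  unfold Spec_get_formula_identifier
  have hB : get_formula_identifier_alt view_str
      = String.ofList (pvGo (fun c => get_special_chars.contains c) true view_str.toList) := by
    unfold get_formula_identifier_alt
    dsimp only
    rw [show (fun c => (PySem.Set.ofList get_special_chars : List Char).contains c)
        = (fun c => get_special_chars.contains c) from funext pvContains_ofList]
    rw [pvB_eq_go (fun c => get_special_chars.contains c)
      view_str.toList.length view_str.toList le_rfl]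
  rw [pvA_eq view_str, hB]
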